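-- pv_equiv track=rewrite | github.com/thegeek-sys/uni | FP/ESAMS-GH/Eserciziario/5_solved/program.py | aux_es5
-- ===== SOURCE A (Python) =====
-- def aux_es5(let, insieme, k, l=1):
--     rez = set()
--     if l==k:
--         return let
--     else:
--         for i in let:
--             for j in insieme:
--                 rez.add(i+j)
--         rez = aux_es5(rez, insieme, k, l+1)
--
--     return rez
-- ===== SOURCE B (Python) =====
-- def aux_es5(let, insieme, k, l=1):
--     current = let
--     for _ in range(k - l):
--         current = {i + j for i in current for j in insieme}
--     return current
-- ===== Notes on version B (the rewrite author's own statement) =====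
-- stated objective: simpler
-- what changed: Replaces the recursive descent with nested add-loops by a counted for-loop over range(k-l) that rebuilds the set each round with a single comprehension.
import Mathlib
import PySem

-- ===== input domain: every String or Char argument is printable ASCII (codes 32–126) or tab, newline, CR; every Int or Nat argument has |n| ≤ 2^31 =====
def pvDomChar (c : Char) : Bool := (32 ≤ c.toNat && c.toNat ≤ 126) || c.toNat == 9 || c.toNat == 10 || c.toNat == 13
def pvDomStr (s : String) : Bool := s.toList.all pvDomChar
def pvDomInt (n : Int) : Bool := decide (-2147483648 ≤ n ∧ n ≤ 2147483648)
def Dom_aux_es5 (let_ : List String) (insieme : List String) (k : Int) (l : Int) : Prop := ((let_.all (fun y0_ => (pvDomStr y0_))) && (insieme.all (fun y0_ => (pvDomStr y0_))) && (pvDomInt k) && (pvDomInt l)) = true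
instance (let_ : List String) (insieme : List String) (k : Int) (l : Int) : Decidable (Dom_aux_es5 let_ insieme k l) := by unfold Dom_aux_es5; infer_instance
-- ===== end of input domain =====

-- B replaces A's recursive descent (nested add-loops into a fresh set, then recurse) by a
-- counted for-loop over range(k-l) rebuilding the set with one comprehension per round (simpler).
-- ===== PORT A =====
-- A recurses with l+1 while l ≠ k; for l > k the Python never terminates (RecursionError),
-- so the port returns [] there as a total-making guard — those inputs are outside Pre_.
def aux_es5 (let_ : List String) (insieme : List String) (k : Int) (l : Int) : List String :=
  if l = k then let_
  else if l < k then
    let rez : List String :=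
      let_.foldl (fun s i => insieme.foldl (fun s j => PySem.Set.add s (i ++ j)) s) PySem.Set.empty
    aux_es5 rez insieme k (l + 1)
  else []
termination_by (k - l).toNat
decreasing_by omega

-- ===== PORT B =====
def aux_es5_alt (let_ : List String) (insieme : List String) (k : Int) (l : Int) : List String :=
  (List.range (k - l).toNat).foldl
    (fun current _ => PySem.Set.ofList (current.flatMap (fun i => insieme.map (fun j => i ++ j))))
    let_

-- ===== PRECONDITION & SPEC =====
-- Pre_ excludes l > k, where Python A recurses without bound and raises RecursionError
-- (B's empty range would return the input set unchanged there).
def Pre_aux_es5 (let_ : List String) (insieme : List String) (k : Int) (l : Int) : Prop := l ≤ k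
instance (let_ : List String) (insieme : List String) (k : Int) (l : Int) : Decidable (Pre_aux_es5 let_ insieme k l) := by unfold Pre_aux_es5; infer_instance
def pvWitness_aux_es5 : List String × List String × Int × Int := (["a", "b"], ["x", "y"], 3, 1)

def Spec_aux_es5 (let_ : List String) (insieme : List String) (k : Int) (l : Int) (out : List String) : Prop := out = aux_es5_alt let_ insieme k l
instance (let_ : List String) (insieme : List String) (k : Int) (l : Int) (out : List String) : Decidable (Spec_aux_es5 let_ insieme k l out) := by unfold Spec_aux_es5; infer_instance

-- ===== CLAIM (what is proved, stated in full; the proofs are below) =====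
def Claim_equal_aux_es5 : Prop := ∀ (let_ : List String) (insieme : List String) (k : Int) (l : Int), Dom_aux_es5 let_ insieme k l → Pre_aux_es5 let_ insieme k l → Spec_aux_es5 let_ insieme k l (aux_es5 let_ insieme k l)

-- ===== LEMMAS AND PROOFS =====

-- A's nested add-loops build exactly B's set-of-flatMap for one round.
lemma step_eq (insieme : List String) (let_ : List String) :
    let_.foldl (fun s i => insieme.foldl (fun s j => PySem.Set.add s (i ++ j)) s) PySem.Set.empty
      = PySem.Set.ofList (let_.flatMap (fun i => insieme.map (fun j => i ++ j))) := by
  rw [PySem.Set.ofList_eq_foldl, List.foldl_flatMap]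
  simp [List.foldl_map, PySem.Set.empty]

-- peeling one round off B's counted loop from the front
lemma alt_peel (step : List String → List String) (n : ℕ) (init : List String) :
    (List.range (n + 1)).foldl (fun c _ => step c) init
      = (List.range n).foldl (fun c _ => step c) (step init) := by
  rw [List.range_succ_eq_map]
  simp [List.foldl_map]

lemma main_eq (insieme : List String) (k : Int) :
    ∀ (n : ℕ) (let_ : List String) (l : Int), l ≤ k → (k - l).toNat = n →
      aux_es5 let_ insieme k l = aux_es5_alt let_ insieme k l := by
  intro n
  induction n with
  | zero =>
    intro let_ l hle hn
    have hk : l = k := by omega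
    rw [aux_es5, aux_es5_alt, if_pos hk, hn]
    simp
  | succ m ih =>
    intro let_ l hle hn
    have hlt : l < k := by omega
    rw [aux_es5, if_neg (by omega), if_pos hlt]
    rw [step_eq]
    have h2 : (k - (l + 1)).toNat = m := by omega
    rw [ih _ (l + 1) (by omega) h2]
    unfold aux_es5_alt
    rw [hn, h2, alt_peel]

-- ===== VERDICT (by name: the statement is the Claim_ definition above) =====
theorem aux_es5_spec : Claim_equal_aux_es5 := by
  intro let_ insieme k l _ hpre
  unfold Spec_aux_es5
  exact main_eq insieme k (k - l).toNat let_ l hpre rfl
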